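-- pv_equiv track=rewrite | github.com/AndrewH-14/cs570-project3 | bruteforce-recursive.py | find_chromatic_number_bruteforce
-- ===== SOURCE A (Python) =====
-- def is_valid_coloring(vertex, color, graph, vertex_colors):
--     for neighbor in graph[vertex]:
--         # If the neighbor vertex has the same color, return False (not valid)
--         if vertex_colors[neighbor] == color:
--             return False
--     # If no neighbor vertices have the same color, return True (valid)
--     return True
--
-- def graph_coloring(graph, num_colors, vertex_colors, current_vertex):
--     # Base case: If all vertices are colored, return the current coloring
--     if current_vertex == len(graph):
--         return vertex_colors
--
--     # Iterate through possible colors for the current vertex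
--     for color in range(1, num_colors + 1):
--         # If the color is valid, assign it to the current vertex
--         if is_valid_coloring(current_vertex, color, graph, vertex_colors):
--             vertex_colors[current_vertex] = color
--
--             # Recursively move on to the next vertex
--             result = graph_coloring(graph, num_colors, vertex_colors, current_vertex + 1)
--
--             # If a valid coloring is found, return it
--             if result:
--                 return result
--
--             # Backtrack and uncolor the current vertex
--             vertex_colors[current_vertex] = 0
--
--     # If no valid coloring is found, return None
--     return None
--
-- def find_chromatic_number_bruteforce(graph):
--     num_vertices = len(graph)
--     # Iterate through possible numbers of colors, starting from 1
--     for num_colors in range(1, num_vertices + 1):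
--         # Initialize the vertex_colors array with zeros (uncolored vertices)
--         vertex_colors = [0] * num_vertices
--         # Try to color the graph with the current number of colors
--         coloring = graph_coloring(graph, num_colors, vertex_colors, 0)
--
--         # If a valid coloring is found, return the chromatic number and coloring
--         if coloring:
--             return num_colors, coloring
--
--     # If no valid coloring is found, return None
--     return None
-- ===== SOURCE B (Python) =====
-- def find_chromatic_number_bruteforce(graph):
--     n = len(graph)
--     for k in range(1, n + 1):
--         # Enumerate candidate colorings of {1..k}^n in lexicographic order,
--         # pruning: on a conflict at position `bad`, jump straight to the next
--         # candidate whose prefix up to `bad` differs (increment with carry).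
--         colors = [1] * n
--         while True:
--             # Replay the assignment left to right; a vertex clashes if one of
--             # its already-assigned neighbors carries the same color.
--             assigned = [0] * n
--             bad = n
--             for v in range(n):
--                 if any(assigned[u] == colors[v] for u in graph[v]):
--                     bad = v
--                     break
--                 assigned[v] = colors[v]
--             if bad == n:
--                 return k, colors
--             # Next candidate: bump position `bad`, carrying leftwards past
--             # maxed-out positions; everything to the right restarts at 1.
--             i = bad
--             while i >= 0 and colors[i] == k:
--                 i -= 1
--             if i < 0:
--                 break  # every candidate on k colors is exhausted
--             colors = colors[:i] + [colors[i] + 1] + [1] * (n - i - 1)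
--     return None
-- ===== Notes on version B (the rewrite author's own statement) =====
-- stated objective: alternative
-- what changed: B replaces A's recursive assign/uncolor backtracking by a pruned lexicographic enumeration: it walks candidate colorings of {1..k}^n as base-k counter values, locates the first conflicting position by replaying the assignment left to right, and advances with an increment-with-carry step that skips every candidate sharing the conflicting prefix; Pre_ excludes only the graphs with a neighbor index outside [-n,n), on which A raises IndexError.
import Mathlib
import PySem

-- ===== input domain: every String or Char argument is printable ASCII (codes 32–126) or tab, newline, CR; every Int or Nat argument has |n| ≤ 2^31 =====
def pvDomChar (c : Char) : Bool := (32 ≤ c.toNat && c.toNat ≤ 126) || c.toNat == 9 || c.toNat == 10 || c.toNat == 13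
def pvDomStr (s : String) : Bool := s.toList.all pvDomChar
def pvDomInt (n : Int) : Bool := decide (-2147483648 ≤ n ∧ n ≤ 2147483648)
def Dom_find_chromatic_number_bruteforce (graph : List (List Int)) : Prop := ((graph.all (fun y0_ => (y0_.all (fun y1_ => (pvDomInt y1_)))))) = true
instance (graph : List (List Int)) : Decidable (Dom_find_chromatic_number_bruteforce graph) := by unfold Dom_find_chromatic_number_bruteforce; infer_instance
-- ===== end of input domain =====

-- B replaces the recursive assign/uncolor backtracking by a pruned lexicographic
-- enumeration of candidate colorings (first-conflict scan + increment-with-carry);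
-- objective: alternative algorithm of the same cost.

-- ===== PORT A =====
-- is_valid_coloring: the early-return loop over graph[vertex] is List.all of the negated test
def pv_is_valid_coloring (vertex : Nat) (color : Int) (graph : List (List Int)) (vc : List Int) : Bool :=
  (graph.getD vertex []).all (fun nb => PySem.List.pyGetD vc nb 0 != color)

-- the `for color in range(1, num_colors+1)` loop of graph_coloring, with the
-- backtracking reset `vertex_colors[current_vertex] = 0`; `next` is the recursive call
def pv_try (graph : List (List Int)) (v : Nat) (next : List Int → Option (List Int)) :
    List Int → List Int → Option (List Int)
  | _, [] => none
  | vc, c :: cs =>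
    if pv_is_valid_coloring v c graph vc then
      match next (vc.set v c) with
      | some r => if r = [] then pv_try graph v next ((vc.set v c).set v 0) cs else some r
      | none => pv_try graph v next ((vc.set v c).set v 0) cs
    else pv_try graph v next vc cs

-- graph_coloring, recursing on rem = len(graph) - current_vertex (rem = 0 is the base case)
def pv_gc (graph : List (List Int)) (k : Int) : Nat → Nat → List Int → Option (List Int)
  | 0, _, vc => some vc
  | rem + 1, v, vc => pv_try graph v (pv_gc graph k rem (v + 1)) vc (PySem.List.pyRange 1 (k + 1) 1)

-- the `for num_colors in range(1, num_vertices+1)` loop; `if coloring:` is Python truthiness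
def pv_colorLoop (graph : List (List Int)) : List Int → Option (Int × List Int)
  | [] => none
  | k :: ks =>
    match pv_gc graph k graph.length 0 (List.replicate graph.length (0 : Int)) with
    | some c => if c = [] then pv_colorLoop graph ks else some (k, c)
    | none => pv_colorLoop graph ks

def find_chromatic_number_bruteforce (graph : List (List Int)) : Option (Int × List Int) :=
  pv_colorLoop graph (PySem.List.pyRange 1 ((graph.length : Int) + 1) 1)

-- ===== PORT B =====
-- the replay scan `for v in range(n): if any(assigned[u] == colors[v] ...): bad = v; break`
-- (recursion on rem = n - v); returns the first conflicting position, or n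
def pvB_scan (graph : List (List Int)) (colors : List Int) : Nat → Nat → List Int → Nat
  | 0, v, _ => v
  | rem + 1, v, assigned =>
    if (graph.getD v []).any (fun u => PySem.List.pyGetD assigned u 0 == colors.getD v 0) then v
    else pvB_scan graph colors rem (v + 1) (assigned.set v (colors.getD v 0))

-- the carry loop `i = bad; while i >= 0 and colors[i] == k: i -= 1`; argument/result are i+1
def pvB_carry (colors : List Int) (k : Int) : Nat → Nat
  | 0 => 0
  | i + 1 => if colors.getD i 0 == k then pvB_carry colors k i else i + 1

-- the `while True` loop over candidates; fuel is a totality guard only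
def pvB_loop (graph : List (List Int)) (k : Int) (n : Nat) : Nat → List Int → Option (List Int)
  | 0, _ => none
  | fuel + 1, colors =>
    let bad := pvB_scan graph colors n 0 (List.replicate n 0)
    if bad = n then some colors
    else
      match pvB_carry colors k (bad + 1) with
      | 0 => none
      | j + 1 =>
        pvB_loop graph k n fuel
          (colors.take j ++ [colors.getD j 0 + 1] ++ List.replicate (n - j - 1) 1)

-- the `for k in range(1, n+1)` loop
def pvB_kloop (graph : List (List Int)) (n : Nat) : List Int → Option (Int × List Int)
  | [] => none
  | k :: ks =>
    match pvB_loop graph k n ((k.toNat + 1) ^ n + 1) (List.replicate n 1) with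
    | some c => some (k, c)
    | none => pvB_kloop graph n ks

def find_chromatic_number_bruteforce_alt (graph : List (List Int)) : Option (Int × List Int) :=
  pvB_kloop graph graph.length (PySem.List.pyRange 1 ((graph.length : Int) + 1) 1)

-- ===== PRECONDITION & SPEC =====
-- Pre_ excludes exactly the graphs with a neighbor index outside [-n, n): on those
-- the Python A (and B alike) raises IndexError before it can ever return.
def Pre_find_chromatic_number_bruteforce (graph : List (List Int)) : Prop :=
  ∀ row ∈ graph, ∀ x ∈ row, -(graph.length : Int) ≤ x ∧ x < (graph.length : Int)
instance (graph : List (List Int)) : Decidable (Pre_find_chromatic_number_bruteforce graph) := by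
  unfold Pre_find_chromatic_number_bruteforce; infer_instance

def pvWitness_find_chromatic_number_bruteforce : List (List Int) := [[1], [0]]

def Spec_find_chromatic_number_bruteforce (graph : List (List Int)) (out : Option (Int × List Int)) : Prop := out = find_chromatic_number_bruteforce_alt graph
instance (graph : List (List Int)) (out : Option (Int × List Int)) : Decidable (Spec_find_chromatic_number_bruteforce graph out) := by unfold Spec_find_chromatic_number_bruteforce; infer_instance

-- ===== CLAIM (what is proved, stated in full; the proofs are below) =====
def Claim_equal_find_chromatic_number_bruteforce : Prop := ∀ (graph : List (List Int)), Dom_find_chromatic_number_bruteforce graph → Pre_find_chromatic_number_bruteforce graph → Spec_find_chromatic_number_bruteforce graph (find_chromatic_number_bruteforce graph)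

-- ===== LEMMAS AND PROOFS =====

-- the constraint A checks when vertex v is decided: it reads only colors.take v and colors[v]
def pvOkAt (graph : List (List Int)) (n v : Nat) (colors : List Int) : Bool :=
  pv_is_valid_coloring v (colors.getD v 0) graph (colors.take v ++ List.replicate (n - v) 0)

-- "every vertex from v on satisfies its constraint"
def pvGood (graph : List (List Int)) (n v : Nat) (colors : List Int) : Bool :=
  (List.range' v (n - v)).all (fun j => pvOkAt graph n j colors)

-- boolean lexicographic order on integer lists
def lexLe : List Int → List Int → Bool
  | [], _ => true
  | _ :: _, [] => false
  | a :: as, b :: bs => if a < b then true else if a = b then lexLe as bs else false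

-- all candidate colorings {1..k}^m, in lexicographic order
def candL (k : Int) : Nat → List (List Int)
  | 0 => [[]]
  | m + 1 => (PySem.List.pyRange 1 (k + 1) 1).flatMap (fun c => (candL k m).map (fun s => c :: s))

lemma mem_candL {k : Int} : ∀ {m : Nat} {d : List Int},
    d ∈ candL k m ↔ d.length = m ∧ ∀ x ∈ d, 1 ≤ x ∧ x ≤ k := by
  intro m
  induction m with
  | zero =>
    intro d
    constructor
    · intro h; simp [candL] at h; subst h; simp
    · rintro ⟨h1, _⟩; simp [candL]; exact List.eq_nil_of_length_eq_zero h1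
  | succ m ih =>
    intro d
    simp only [candL, List.mem_flatMap, List.mem_map]
    constructor
    · rintro ⟨c, hc, s, hs, rfl⟩
      have hcr := PySem.List.mem_pyRange_one.mp hc
      obtain ⟨hl, he⟩ := ih.mp hs
      refine ⟨by simp [hl], ?_⟩
      intro x hx
      rcases List.mem_cons.mp hx with rfl | hx
      · exact ⟨hcr.1, by omega⟩
      · exact he x hx
    · rintro ⟨hl, he⟩
      cases d with
      | nil => simp at hl
      | cons c s =>
        refine ⟨c, PySem.List.mem_pyRange_one.mpr
            ⟨(he c (by simp)).1, by have := (he c (by simp)).2; omega⟩,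
          s, ih.mpr ⟨by simpa using hl, fun x hx => he x (by simp [hx])⟩, rfl⟩

lemma length_candL (k : Int) : ∀ m : Nat, (candL k m).length = k.toNat ^ m := by
  intro m
  induction m with
  | zero => simp [candL]
  | succ m ih =>
    have h : ∀ (L : List Int),
        (L.flatMap (fun c => (candL k m).map (fun s => c :: s))).length
          = L.length * (candL k m).length := by
      intro L
      induction L with
      | nil => simp
      | cons a L ihL => simp [ihL, Nat.succ_mul, Nat.add_comm]
    rw [candL, h, PySem.List.length_pyRange_one, ih,
      show (k + 1 - 1 : Int) = k from by ring, Nat.pow_succ, Nat.mul_comm]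

lemma lexLe_refl : ∀ c : List Int, lexLe c c = true := by
  intro c
  induction c with
  | nil => rfl
  | cons x cs ih => simp [lexLe, lt_irrefl, ih]

lemma lexLe_trans : ∀ {a b c : List Int}, lexLe a b = true → lexLe b c = true → lexLe a c = true := by
  intro a
  induction a with
  | nil => intro b c _ _; rfl
  | cons x as ih =>
    intro b c hab hbc
    cases b with
    | nil => simp [lexLe] at hab
    | cons y bs =>
      cases c with
      | nil => simp [lexLe] at hbc
      | cons z cs =>
        by_cases h1 : x < y
        · by_cases h2 : y < z
          · simp [lexLe, show x < z from lt_trans h1 h2]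
          · by_cases h3 : y = z
            · simp [lexLe, show x < z from h3 ▸ h1]
            · simp [lexLe, h2, h3] at hbc
        · by_cases h4 : x = y
          · subst h4
            simp only [lexLe, if_neg h1, if_pos rfl] at hab
            by_cases h2 : x < z
            · simp [lexLe, h2]
            · by_cases h3 : x = z
              · subst h3
                simp only [lexLe, if_neg h2, if_pos rfl] at hbc ⊢
                exact ih hab hbc
              · simp [lexLe, h2, h3] at hbc
          · simp [lexLe, h1, h4] at hab

lemma lexLe_replicate_one : ∀ {d : List Int}, (∀ x ∈ d, 1 ≤ x) →
    lexLe (List.replicate d.length 1) d = true := by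
  intro d
  induction d with
  | nil => intro _; rfl
  | cons x ds ih =>
    intro h
    simp only [List.length_cons, List.replicate_succ, lexLe]
    by_cases h1 : (1 : Int) < x
    · simp [h1]
    · have hx : x = 1 := by have := h x (by simp); omega
      subst hx
      simp only [lt_irrefl, if_neg (lt_irrefl (1 : Int)), if_pos rfl]
      exact ih (fun y hy => h y (by simp [hy]))

lemma lexLe_append_lt : ∀ (p : List Int) {a b : Int} (t u : List Int), a < b →
    lexLe (p ++ a :: t) (p ++ b :: u) = true := by
  intro p
  induction p with
  | nil => intro a b t u h; simp [lexLe, h]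
  | cons x p ih =>
    intro a b t u h
    simp only [List.cons_append, lexLe, lt_irrefl, if_neg (lt_irrefl x), if_pos rfl]
    exact ih t u h

lemma lexLe_append_gt : ∀ (p : List Int) {a b : Int} (t u : List Int), b < a →
    lexLe (p ++ a :: t) (p ++ b :: u) = false := by
  intro p
  induction p with
  | nil =>
    intro a b t u h
    simp [lexLe, show ¬ a < b from by omega, show ¬ a = b from by omega]
  | cons x p ih =>
    intro a b t u h
    simp only [List.cons_append, lexLe, lt_irrefl, if_neg (lt_irrefl x), if_pos rfl]
    exact ih t u h

-- a maxed-out prefix pins down the start of anything lexicographically above it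
lemma maxed_prefix {k : Int} : ∀ (t r d : List Int), (∀ x ∈ t, x = k) → (∀ x ∈ d, x ≤ k) →
    lexLe (t ++ r) d = true → d.take t.length = t := by
  intro t
  induction t with
  | nil => intros; simp
  | cons x t ih =>
    intro r d hmax hd hle
    cases d with
    | nil => simp [lexLe] at hle
    | cons y d' =>
      have hx : x = k := hmax x (by simp)
      have hy : y ≤ k := hd y (by simp)
      simp only [List.cons_append, lexLe] at hle
      by_cases h1 : x < y
      · omega
      · by_cases h2 : x = y
        · simp only [if_neg h1, if_pos h2] at hle
          have htail := ih r d' (fun z hz => hmax z (by simp [hz]))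
            (fun z hz => hd z (by simp [hz])) hle
          rw [List.length_cons, List.take_succ_cons, htail, h2]
        · simp [h1, h2] at hle

-- every candidate between c = p ++ a :: (t ++ r) (positions of t maxed out) and its
-- carry-successor p ++ (a+1) :: 1… agrees with c on the first |p|+1+|t| positions
lemma block_prefix {k : Int} : ∀ (p : List Int) (a : Int) (t r d : List Int),
    (∀ x ∈ t, x = k) → (∀ x ∈ d, 1 ≤ x ∧ x ≤ k) →
    d.length = p.length + 1 + t.length + r.length →
    lexLe (p ++ a :: (t ++ r)) d = true →
    lexLe (p ++ (a + 1) :: List.replicate (t.length + r.length) 1) d = false →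
    d.take (p.length + 1 + t.length) = p ++ a :: t := by
  intro p
  induction p with
  | nil =>
    intro a t r d hmax hd hlen hle hgt
    cases d with
    | nil => simp only [List.length_nil] at hlen; omega
    | cons y d' =>
      simp only [List.nil_append, lexLe] at hle hgt
      have hy1 : 1 ≤ y := (hd y (by simp)).1
      have hyk : y ≤ k := (hd y (by simp)).2
      by_cases h1 : a + 1 < y
      · simp [h1] at hgt
      · by_cases h2 : a + 1 = y
        · simp only [if_neg h1, if_pos h2] at hgt
          have hlen' : d'.length = t.length + r.length := by
            simp only [List.length_cons, List.length_nil] at hlen; omega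
          have hrep := lexLe_replicate_one (d := d') (fun z hz => (hd z (by simp [hz])).1)
          rw [hlen'] at hrep
          rw [hrep] at hgt
          exact absurd hgt (by simp)
        · by_cases h3 : a < y
          · omega
          · by_cases h4 : a = y
            · simp only [if_neg h3, if_pos h4] at hle
              have htail := maxed_prefix (k := k) t r d' hmax
                (fun z hz => (hd z (by simp [hz])).2) hle
              subst h4
              simp only [List.length_nil, List.nil_append]
              rw [show 0 + 1 + t.length = t.length + 1 from by omega,
                List.take_succ_cons, htail]
            · simp [h3, h4] at hle
  | cons x p ih =>
    intro a t r d hmax hd hlen hle hgt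
    cases d with
    | nil => simp only [List.length_nil] at hlen; omega
    | cons y d' =>
      simp only [List.cons_append, lexLe] at hle hgt
      by_cases h1 : x < y
      · simp [h1] at hgt
      · by_cases h2 : x = y
        · simp only [if_neg h1, if_pos h2] at hle hgt
          subst h2
          have hrec := ih a t r d' hmax (fun z hz => hd z (by simp [hz]))
            (by simp only [List.length_cons] at hlen ⊢; omega) hle hgt
          simp only [List.length_cons, List.cons_append]
          rw [show p.length + 1 + 1 + t.length = (p.length + 1 + t.length) + 1 from by omega,
            List.take_succ_cons, hrec]
        · simp [h1, h2] at hle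

lemma pvOkAt_congr_take (graph : List (List Int)) (n v : Nat) {c d : List Int}
    (h : d.take (v + 1) = c.take (v + 1)) : pvOkAt graph n v d = pvOkAt graph n v c := by
  have h1 : d.take v = c.take v := by
    have h' := congrArg (List.take v) h
    rwa [List.take_take, List.take_take, Nat.min_eq_left (Nat.le_succ v)] at h'
  have h2 : d.getD v 0 = c.getD v 0 := by
    have h' := congrArg (fun l => List.getD l v 0) h
    simpa [List.getD_eq_getElem?_getD, List.getElem?_take, Nat.lt_succ_self] using h'
  unfold pvOkAt
  rw [h1, h2]

lemma pvGood_ge (graph : List (List Int)) (n v : Nat) (colors : List Int) (h : n ≤ v) :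
    pvGood graph n v colors = true := by
  simp [pvGood, Nat.sub_eq_zero_of_le h]

lemma pvGood_succ (graph : List (List Int)) {n v : Nat} (colors : List Int) (h : v < n) :
    pvGood graph n v colors = (pvOkAt graph n v colors && pvGood graph n (v + 1) colors) := by
  unfold pvGood
  rw [show n - v = (n - (v + 1)) + 1 from by omega, List.range'_succ]
  simp

lemma pvGood_zero_iff (graph : List (List Int)) (n : Nat) (colors : List Int) :
    pvGood graph n 0 colors = true ↔ ∀ j < n, pvOkAt graph n j colors = true := by
  unfold pvGood
  rw [List.all_eq_true]
  constructor
  · intro h j hj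
    exact h j (by rw [List.mem_range'_1]; omega)
  · intro h j hj
    rw [List.mem_range'_1] at hj
    exact h j (by omega)

lemma pvGood_zero_false (graph : List (List Int)) {n j : Nat} (colors : List Int)
    (hj : j < n) (h : pvOkAt graph n j colors = false) : pvGood graph n 0 colors = false := by
  cases hg : pvGood graph n 0 colors
  · rfl
  · have := (pvGood_zero_iff graph n colors).mp hg j hj
    rw [h] at this
    exact absurd this (by simp)

-- find? commutes with switching the filter when the two filters agree up to the predicate
lemma find?_filter_switch {α : Type} (p q1 q2 : α → Bool) :
    ∀ l : List α, (∀ x ∈ l, (q1 x && p x) = (q2 x && p x)) →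
      (l.filter q1).find? p = (l.filter q2).find? p := by
  intro l
  induction l with
  | nil => intro _; rfl
  | cons x l ih =>
    intro h
    have hx := h x (by simp)
    have ihl := ih (fun y hy => h y (by simp [hy]))
    cases h1 : q1 x <;> cases h2 : q2 x
    · simp [List.filter_cons, h1, h2, ihl]
    · have hp : p x = false := by rw [h1, h2] at hx; simpa using hx.symm
      simp [List.filter_cons, h1, h2, List.find?_cons, hp, ihl]
    · have hp : p x = false := by rw [h1, h2] at hx; simpa using hx
      simp [List.filter_cons, h1, h2, List.find?_cons, hp, ihl]
    · cases hp : p x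
      · simp [List.filter_cons, h1, h2, List.find?_cons, hp, ihl]
      · simp [List.filter_cons, h1, h2, List.find?_cons, hp]

lemma filter_sublist_of_imp {α : Type} (q1 q2 : α → Bool) :
    ∀ l : List α, (∀ x ∈ l, q2 x = true → q1 x = true) →
      List.Sublist (l.filter q2) (l.filter q1) := by
  intro l
  induction l with
  | nil => intro _; simp
  | cons x l ih =>
    intro h
    have ihl := ih (fun y hy hq => h y (by simp [hy]) hq)
    cases h2 : q2 x
    · cases h1 : q1 x
      · simpa [List.filter_cons, h1, h2] using ihl
      · simp only [List.filter_cons, h1, h2, Bool.false_eq_true, if_false, if_true]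
        exact List.Sublist.cons x ihl
    · have h1 : q1 x = true := h x (by simp) h2
      simp only [List.filter_cons, h1, h2, if_true]
      exact List.Sublist.cons₂ x ihl

lemma find?_congr_mem {α : Type} {p q : α → Bool} :
    ∀ {l : List α}, (∀ x ∈ l, p x = q x) → l.find? p = l.find? q := by
  intro l
  induction l with
  | nil => intro _; rfl
  | cons x l ih =>
    intro h
    rw [List.find?_cons, List.find?_cons, h x (by simp), ih (fun y hy => h y (by simp [hy]))]

lemma find?_append' {α : Type} (p : α → Bool) :
    ∀ (l1 l2 : List α), ((l1 ++ l2).find? p) = (l1.find? p).or (l2.find? p) := by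
  intro l1 l2
  induction l1 with
  | nil => simp
  | cons x l1 ih => cases hp : p x <;> simp [List.find?_cons, hp, ih]

-- ---- the scan computes the first position violating pvOkAt ----

lemma pvB_scan_spec (graph : List (List Int)) (colors : List Int) {n : Nat}
    (hc : colors.length = n) :
    ∀ rem v, v + rem = n →
      v ≤ pvB_scan graph colors rem v (colors.take v ++ List.replicate (n - v) 0) ∧
      pvB_scan graph colors rem v (colors.take v ++ List.replicate (n - v) 0) ≤ n ∧
      (∀ j, v ≤ j → j < pvB_scan graph colors rem v (colors.take v ++ List.replicate (n - v) 0) →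
        pvOkAt graph n j colors = true) ∧
      (pvB_scan graph colors rem v (colors.take v ++ List.replicate (n - v) 0) < n →
        pvOkAt graph n (pvB_scan graph colors rem v (colors.take v ++ List.replicate (n - v) 0))
          colors = false) := by
  intro rem
  induction rem with
  | zero =>
    intro v hv
    simp only [pvB_scan]
    exact ⟨le_refl v, by omega, fun j h1 h2 => by omega, fun h => by omega⟩
  | succ rem ih =>
    intro v hv
    have hvn : v < n := by omega
    have hcond : ((graph.getD v []).any
        (fun u => PySem.List.pyGetD (colors.take v ++ List.replicate (n - v) 0) u 0
          == colors.getD v 0)) = !(pvOkAt graph n v colors) := by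
      unfold pvOkAt pv_is_valid_coloring
      generalize graph.getD v [] = L
      induction L with
      | nil => rfl
      | cons u L ihL =>
        simp only [List.any_cons, List.all_cons, bne, Bool.not_and, Bool.not_not] at ihL ⊢
        rw [ihL]
    have hupd : (colors.take v ++ List.replicate (n - v) 0).set v (colors.getD v 0)
        = colors.take (v + 1) ++ List.replicate (n - (v + 1)) 0 := by
      have hlt : v < colors.length := by omega
      have hl : (colors.take v).length = v := by
        rw [List.length_take, Nat.min_eq_left (by omega)]
      have hgen : ∀ P : List Int, P.length = v →
          (P ++ List.replicate (n - v) 0).set v (colors.getD v 0)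
            = P ++ colors.getD v 0 :: List.replicate (n - (v + 1)) 0 := by
        intro P hP
        rw [show n - v = (n - (v + 1)) + 1 from by omega, List.replicate_succ, ← hP,
          List.set_append_right _ _ (le_refl _)]
        simp
      have htv : colors.take (v + 1) = colors.take v ++ [colors.getD v 0] := by
        rw [List.getD_eq_getElem _ _ hlt, List.take_concat_get' _ _ hlt]
      rw [hgen (colors.take v) hl, htv, List.append_assoc, List.singleton_append]
    cases hOk : pvOkAt graph n v colors
    · simp only [pvB_scan]
      rw [hcond, hOk]
      simp only [Bool.not_false, if_true]
      exact ⟨le_refl v, by omega, fun j h1 h2 => by omega, fun _ => hOk⟩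
    · simp only [pvB_scan]
      rw [hcond, hOk]
      simp only [Bool.not_true, Bool.false_eq_true, if_false]
      rw [hupd]
      obtain ⟨ih1, ih2, ih3, ih4⟩ := ih (v + 1) (by omega)
      refine ⟨by omega, ih2, ?_, ih4⟩
      intro j h1 h2
      rcases Nat.eq_or_lt_of_le h1 with rfl | h1'
      · exact hOk
      · exact ih3 j (by omega) h2

lemma pvB_carry_zero (colors : List Int) (k : Int) :
    ∀ b, pvB_carry colors k (b + 1) = 0 → ∀ i ≤ b, colors.getD i 0 = k := by
  intro b
  induction b with
  | zero =>
    intro h i hi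
    have hstep : pvB_carry colors k (0 + 1)
        = if colors.getD 0 0 == k then pvB_carry colors k 0 else 0 + 1 := rfl
    rw [hstep] at h
    cases hk : colors.getD 0 0 == k
    · rw [hk] at h; simp at h
    · have : i = 0 := by omega
      subst this
      exact beq_iff_eq.mp hk
  | succ b ih =>
    intro h i hi
    have hstep : pvB_carry colors k (b + 1 + 1)
        = if colors.getD (b + 1) 0 == k then pvB_carry colors k (b + 1) else b + 1 + 1 := rfl
    rw [hstep] at h
    cases hk : colors.getD (b + 1) 0 == k
    · rw [hk] at h; simp at h
    · rw [hk] at h; simp at h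
      rcases Nat.lt_or_ge i (b + 1) with h' | h'
      · exact ih h i (by omega)
      · have : i = b + 1 := by omega
        subst this
        exact beq_iff_eq.mp hk

lemma pvB_carry_succ (colors : List Int) (k : Int) :
    ∀ b j, pvB_carry colors k (b + 1) = j + 1 →
      j ≤ b ∧ colors.getD j 0 ≠ k ∧ ∀ i, j < i → i ≤ b → colors.getD i 0 = k := by
  intro b
  induction b with
  | zero =>
    intro j h
    have hstep : pvB_carry colors k (0 + 1)
        = if colors.getD 0 0 == k then pvB_carry colors k 0 else 0 + 1 := rfl
    rw [hstep] at h
    cases hk : colors.getD 0 0 == k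
    · rw [hk] at h; simp at h
      have hj : j = 0 := by omega
      subst hj
      exact ⟨le_refl 0, ne_of_beq_false hk, fun i h1 h2 => by omega⟩
    · rw [hk] at h; simp at h
      rw [show pvB_carry colors k 0 = 0 from rfl] at h
      omega
  | succ b ih =>
    intro j h
    have hstep : pvB_carry colors k (b + 1 + 1)
        = if colors.getD (b + 1) 0 == k then pvB_carry colors k (b + 1) else b + 1 + 1 := rfl
    rw [hstep] at h
    cases hk : colors.getD (b + 1) 0 == k
    · rw [hk] at h; simp at h
      have hj : j = b + 1 := by omega
      subst hj
      exact ⟨le_refl _, ne_of_beq_false hk, fun i h1 h2 => by omega⟩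
    · rw [hk] at h; simp at h
      obtain ⟨h1, h2, h3⟩ := ih j h
      refine ⟨by omega, h2, ?_⟩
      intro i hi1 hi2
      rcases Nat.lt_or_ge i (b + 1) with h' | h'
      · exact h3 i hi1 (by omega)
      · have : i = b + 1 := by omega
        subst this
        exact beq_iff_eq.mp hk

-- ---- A's backtracking search = first good candidate ----

lemma gc_find (graph : List (List Int)) (k : Int) :
    ∀ (m : Nat) (p : List Int), p.length + m = graph.length →
      pv_gc graph k m p.length (p ++ List.replicate m 0) =
        ((candL k m).map (fun s => p ++ s)).find? (pvGood graph graph.length p.length) := by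
  intro m
  induction m with
  | zero =>
    intro p hp
    have hg := pvGood_ge graph graph.length p.length p (by omega)
    simp only [pv_gc, candL, List.map_cons, List.map_nil, List.replicate_zero, List.append_nil]
    rw [List.find?_cons, hg]
  | succ m ih =>
    intro p hp
    have hvlt : p.length < graph.length := by omega
    have hset : ∀ c : Int, (p ++ List.replicate (m + 1) 0).set p.length c
        = (p ++ [c]) ++ List.replicate m 0 := by
      intro c
      rw [List.replicate_succ, List.set_append_right _ _ (le_refl _)]
      simp
    have hreset : ((p ++ List.replicate (m + 1) 0).set p.length 0)
        = p ++ List.replicate (m + 1) 0 := by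
      rw [List.replicate_succ, List.set_append_right _ _ (le_refl _)]
      simp [List.replicate_succ]
    have hvalid_eq : ∀ (c : Int) (s : List Int), pvOkAt graph graph.length p.length (p ++ c :: s)
        = pv_is_valid_coloring p.length c graph (p ++ List.replicate (m + 1) 0) := by
      intro c s
      have h1 : (p ++ c :: s).getD p.length 0 = c := by
        rw [List.getD_eq_getElem?_getD, List.getElem?_append_right (le_refl _)]
        simp
      have h2 : (p ++ c :: s).take p.length = p := List.take_left
      unfold pvOkAt
      rw [h1, h2, show graph.length - p.length = m + 1 from by omega]
    have key : ∀ L : List Int,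
        pv_try graph p.length (pv_gc graph k m (p.length + 1)) (p ++ List.replicate (m + 1) 0) L =
          (L.flatMap (fun c => (candL k m).map (fun s => p ++ c :: s))).find?
            (pvGood graph graph.length p.length) := by
      intro L
      induction L with
      | nil => simp [pv_try]
      | cons c cs ihL =>
        cases hv : pv_is_valid_coloring p.length c graph (p ++ List.replicate (m + 1) 0)
        · have hblock : ((candL k m).map (fun s => p ++ c :: s)).find?
              (pvGood graph graph.length p.length) = none := by
            apply List.find?_eq_none.mpr
            intro x hx
            rcases List.mem_map.mp hx with ⟨s, _, rfl⟩
            rw [pvGood_succ graph _ hvlt, hvalid_eq c s, hv]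
            simp
          simp only [pv_try]
          rw [if_neg (by simp [hv])]
          rw [ihL, List.flatMap_cons, find?_append', hblock, Option.none_or]
        · have hgc := ih (p ++ [c]) (by simp; omega)
          have hlen1 : (p ++ [c]).length = p.length + 1 := by simp
          rw [hlen1] at hgc
          have hmap : ((candL k m).map (fun s => (p ++ [c]) ++ s))
              = ((candL k m).map (fun s => p ++ c :: s)) :=
            List.map_congr_left (fun s _ => by simp)
          rw [hmap] at hgc
          have hcongr : ((candL k m).map (fun s => p ++ c :: s)).find?
                (pvGood graph graph.length (p.length + 1))
              = ((candL k m).map (fun s => p ++ c :: s)).find?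
                (pvGood graph graph.length p.length) := by
            apply find?_congr_mem
            intro x hx
            rcases List.mem_map.mp hx with ⟨s, _, rfl⟩
            rw [pvGood_succ graph _ hvlt, hvalid_eq c s, hv, Bool.true_and]
          simp only [pv_try]
          rw [if_pos hv, hset c, hgc]
          cases hF : ((candL k m).map (fun s => p ++ c :: s)).find?
              (pvGood graph graph.length (p.length + 1)) with
          | some r =>
            have hrne : r ≠ [] := by
              have hmem := List.mem_of_find?_eq_some hF
              rcases List.mem_map.mp hmem with ⟨s, _, rfl⟩
              simp
            dsimp only
            rw [if_neg hrne]
            rw [List.flatMap_cons, find?_append', ← hcongr, hF, Option.some_or]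
          | none =>
            have hreset2 : ((p ++ [c]) ++ List.replicate m 0).set p.length 0
                = p ++ List.replicate (m + 1) 0 := by
              rw [← hset c, List.set_set, hreset]
            dsimp only
            rw [hreset2, ihL]
            rw [List.flatMap_cons, find?_append', ← hcongr, hF, Option.none_or]
    simp only [pv_gc]
    have hflat : ((candL k (m + 1)).map (fun s => p ++ s))
        = (PySem.List.pyRange 1 (k + 1) 1).flatMap
            (fun c => (candL k m).map (fun s => p ++ c :: s)) := by
      rw [candL, List.map_flatMap]
      simp only [List.map_map]
      rfl
    rw [hflat]
    exact key _

-- ---- candL is lexicographically sorted ----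

lemma candL_pairwise (k : Int) : ∀ m : Nat, (candL k m).Pairwise (fun c d => lexLe d c = false) := by
  intro m
  induction m with
  | zero => simp [candL]
  | succ m ih =>
    rw [candL]
    have gen : ∀ L : List Int, L.Pairwise (· < ·) →
        (L.flatMap (fun c => (candL k m).map (fun s => c :: s))).Pairwise
          (fun c d => lexLe d c = false) := by
      intro L
      induction L with
      | nil => intro _; simp
      | cons c L ihL =>
        intro hp
        rw [List.flatMap_cons, List.pairwise_append]
        refine ⟨?_, ihL (List.pairwise_cons.mp hp).2, ?_⟩
        · rw [List.pairwise_map]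
          refine ih.imp ?_
          intro s1 s2 h
          simp only [lexLe, lt_irrefl, if_neg (lt_irrefl c), if_pos rfl]
          exact h
        · intro x hx y hy
          rcases List.mem_map.mp hx with ⟨s1, _, rfl⟩
          rcases List.mem_flatMap.mp hy with ⟨c', hc', hy2⟩
          rcases List.mem_map.mp hy2 with ⟨s2, _, rfl⟩
          have hcc : c < c' := (List.pairwise_cons.mp hp).1 c' hc'
          simp [lexLe, show ¬ c' < c from by omega, show ¬ c' = c from by omega]
    exact gen _ (PySem.List.pairwise_lt_pyRange_one 1 (k + 1))

lemma take_prefix_block {α : Type} (p : List α) (x : α) (t r : List α) :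
    (p ++ x :: (t ++ r)).take (p.length + 1 + t.length) = p ++ x :: t := by
  induction p with
  | nil =>
    simp only [List.nil_append, List.length_nil]
    rw [show 0 + 1 + t.length = t.length + 1 from by omega, List.take_succ_cons,
      List.take_left]
  | cons y p ih =>
    simp only [List.cons_append, List.length_cons]
    rw [show p.length + 1 + 1 + t.length = (p.length + 1 + t.length) + 1 from by omega,
      List.take_succ_cons, ih]

-- ---- B's pruned enumeration = first good candidate ≥ current ----

lemma loop_find (graph : List (List Int)) (k : Int) (n : Nat) :
    ∀ fuel (c : List Int), c.length = n → (∀ x ∈ c, 1 ≤ x ∧ x ≤ k) →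
      ((candL k n).filter (fun d => lexLe c d)).length < fuel →
      pvB_loop graph k n fuel c =
        ((candL k n).filter (fun d => lexLe c d)).find? (pvGood graph n 0) := by
  intro fuel
  induction fuel with
  | zero => intro c _ _ hlt; omega
  | succ fuel ih =>
    intro c hlen hent hlt
    obtain ⟨hge0, hbn, hok, hbadf⟩ := by
      have h := pvB_scan_spec graph c (n := n) hlen n 0 (by omega)
      simp only [List.take_zero, List.nil_append, Nat.sub_zero] at h
      exact h
    have hstep : pvB_loop graph k n (fuel + 1) c
        = (if pvB_scan graph c n 0 (List.replicate n 0) = n then some c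
          else match pvB_carry c k (pvB_scan graph c n 0 (List.replicate n 0) + 1) with
            | 0 => none
            | j + 1 => pvB_loop graph k n fuel
                (c.take j ++ [c.getD j 0 + 1] ++ List.replicate (n - j - 1) 1)) := rfl
    rw [hstep]
    by_cases hB : pvB_scan graph c n 0 (List.replicate n 0) = n
    · rw [if_pos hB]
      have hg : pvGood graph n 0 c = true :=
        (pvGood_zero_iff graph n c).mpr (fun j hj => hok j (by omega) (by rw [hB]; exact hj))
      have hcmem : c ∈ candL k n := mem_candL.mpr ⟨hlen, hent⟩
      obtain ⟨l1, l2, hsplit⟩ := List.append_of_mem hcmem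
      have hpw := candL_pairwise k n
      rw [hsplit, List.pairwise_append] at hpw
      rw [hsplit, List.filter_append]
      have hfl1 : l1.filter (fun d => lexLe c d) = [] :=
        List.filter_eq_nil_iff.mpr (fun d hd => by
          have := hpw.2.2 d hd c (by simp)
          simp [this])
      rw [hfl1, List.nil_append, List.filter_cons, if_pos (lexLe_refl c),
        List.find?_cons, hg]
    · rw [if_neg hB]
      have hbn' : pvB_scan graph c n 0 (List.replicate n 0) < n := by omega
      set bad := pvB_scan graph c n 0 (List.replicate n 0) with hbaddef
      have hbadf' := hbadf hbn'
      cases hcar : pvB_carry c k (bad + 1) with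
      | zero =>
        have hall := pvB_carry_zero c k bad hcar
        have hnone : ((candL k n).filter (fun d => lexLe c d)).find? (pvGood graph n 0)
            = none := by
          apply List.find?_eq_none.mpr
          intro d hd
          obtain ⟨hdmem, hdle⟩ := List.mem_filter.mp hd
          obtain ⟨hdl, hde⟩ := mem_candL.mp hdmem
          have htk : ∀ x ∈ c.take (bad + 1), x = k := by
            intro x hx
            rcases List.mem_iff_getElem.mp hx with ⟨i, hi, hgi⟩
            have hi2 : i ≤ bad ∧ i < c.length := by
              simp [List.length_take] at hi
              omega
            rw [List.getElem_take] at hgi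
            rw [← hgi]
            have := hall i (by omega)
            rwa [List.getD_eq_getElem _ _ (by omega)] at this
          have hco : lexLe (c.take (bad + 1) ++ c.drop (bad + 1)) d = true := by
            rw [List.take_append_drop]
            exact hdle
          have hmax := maxed_prefix (k := k) (c.take (bad + 1)) (c.drop (bad + 1)) d htk
            (fun z hz => (hde z hz).2) hco
          have hlt3 : (c.take (bad + 1)).length = bad + 1 := by
            rw [List.length_take, Nat.min_eq_left (by omega)]
          rw [hlt3] at hmax
          have hokd : pvOkAt graph n bad d = false := by
            rw [pvOkAt_congr_take graph n bad hmax]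
            exact hbadf'
          rw [pvGood_zero_false graph d hbn' hokd]
          simp
        show (none : Option (List Int))
            = ((candL k n).filter (fun d => lexLe c d)).find? (pvGood graph n 0)
        rw [hnone]
      | succ j =>
        show pvB_loop graph k n fuel
            (c.take j ++ [c.getD j 0 + 1] ++ List.replicate (n - j - 1) 1)
          = ((candL k n).filter (fun d => lexLe c d)).find? (pvGood graph n 0)
        obtain ⟨hjb, hjk, hmaxed⟩ := pvB_carry_succ c k bad j hcar
        have hjn : j < n := by omega
        have hjlen : j < c.length := by omega
        have ha_mem : c.getD j 0 ∈ c := by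
          rw [List.getD_eq_getElem _ _ hjlen]
          exact List.getElem_mem hjlen
        have ha1 : 1 ≤ c.getD j 0 := (hent _ ha_mem).1
        have hak : c.getD j 0 < k := by
          have h2 := (hent _ ha_mem).2
          rcases lt_or_eq_of_le h2 with h | h
          · exact h
          · exact absurd h hjk
        have hk1 : (1 : Int) ≤ k := by omega
        set a := c.getD j 0 with hadef
        set s := c.take j ++ [a + 1] ++ List.replicate (n - j - 1) 1 with hsdef
        have htakejlen : (c.take j).length = j := by
          rw [List.length_take, Nat.min_eq_left (by omega)]
        have hslen : s.length = n := by
          rw [hsdef]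
          simp only [List.length_append, htakejlen, List.length_replicate,
            List.length_cons, List.length_nil]
          omega
        have hsent : ∀ x ∈ s, 1 ≤ x ∧ x ≤ k := by
          rw [hsdef]
          intro x hx
          simp only [List.mem_append, List.mem_singleton, List.mem_replicate] at hx
          rcases hx with (hx | rfl) | hx
          · exact hent x (List.mem_of_mem_take hx)
          · exact ⟨by omega, by omega⟩
          · obtain ⟨_, rfl⟩ := hx
            exact ⟨le_refl 1, hk1⟩
        set t := (c.drop (j + 1)).take (bad - j) with htdef
        set r := c.drop (bad + 1) with hrdef
        have htlen : t.length = bad - j := by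
          rw [htdef, List.length_take, List.length_drop, Nat.min_eq_left (by omega)]
        have hrlen : r.length = n - (bad + 1) := by
          rw [hrdef, List.length_drop, hlen]
        have hdd : (c.drop (j + 1)).drop (bad - j) = c.drop (bad + 1) := by
          rw [List.drop_drop]
          congr 1
          omega
        have hcdec : c = c.take j ++ a :: (t ++ r) := by
          conv_lhs => rw [← List.take_append_drop j c]
          congr 1
          rw [List.drop_eq_getElem_cons hjlen]
          congr 1
          · rw [hadef, List.getD_eq_getElem _ _ hjlen]
          · rw [htdef, hrdef, ← hdd, List.take_append_drop]
        have htmaxv : ∀ x ∈ t, x = k := by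
          rw [htdef]
          intro x hx
          rcases List.mem_iff_getElem.mp hx with ⟨i, hi, hgi⟩
          have hi2 : i < bad - j := by
            simp [List.length_take, List.length_drop] at hi
            omega
          rw [List.getElem_take, List.getElem_drop] at hgi
          rw [← hgi]
          have := hmaxed (j + 1 + i) (by omega) (by omega)
          rwa [List.getD_eq_getElem _ _ (by omega)] at this
        have hs_eq : s = c.take j ++ (a + 1) :: List.replicate (n - j - 1) 1 := by
          rw [hsdef, List.append_assoc, List.singleton_append]
        have hcls : lexLe c s = true := by
          have h := lexLe_append_lt (c.take j) (t ++ r) (List.replicate (n - j - 1) 1)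
            (show a < a + 1 from by omega)
          rw [← hcdec, ← hs_eq] at h
          exact h
        have hslc : lexLe s c = false := by
          have h := lexLe_append_gt (c.take j) (List.replicate (n - j - 1) 1) (t ++ r)
            (show a < a + 1 from by omega)
          rw [← hcdec, ← hs_eq] at h
          exact h
        have hctake : c.take (bad + 1) = c.take j ++ a :: t := by
          have h := congrArg (List.take (bad + 1)) hcdec
          rw [h, show bad + 1 = (c.take j).length + 1 + t.length from by
              rw [htakejlen, htlen]; omega, take_prefix_block]
        have hblock : ∀ d ∈ candL k n, lexLe c d = true → lexLe s d = false →
            pvGood graph n 0 d = false := by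
          intro d hd hcd hsd
          obtain ⟨hdl, hde⟩ := mem_candL.mp hd
          have hlensum : d.length = (c.take j).length + 1 + t.length + r.length := by
            rw [hdl, htakejlen, htlen, hrlen]
            omega
          have hgt : lexLe (c.take j ++ (a + 1) :: List.replicate (t.length + r.length) 1) d
              = false := by
            rw [htlen, hrlen, show bad - j + (n - (bad + 1)) = n - j - 1 from by omega,
              ← hs_eq]
            exact hsd
          have hble := block_prefix (k := k) (c.take j) a t r d htmaxv hde hlensum
            (by rw [← hcdec]; exact hcd) hgt
          have hidx : (c.take j).length + 1 + t.length = bad + 1 := by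
            rw [htakejlen, htlen]
            omega
          rw [hidx] at hble
          have hdok : pvOkAt graph n bad d = false := by
            rw [pvOkAt_congr_take graph n bad (c := c) (d := d) (by rw [hble, hctake])]
            exact hbadf'
          exact pvGood_zero_false graph d hbn' hdok
        have hswitch : ((candL k n).filter (fun d => lexLe c d)).find? (pvGood graph n 0)
            = ((candL k n).filter (fun d => lexLe s d)).find? (pvGood graph n 0) := by
          apply find?_filter_switch
          intro d hd
          dsimp only
          cases hsd : lexLe s d
          · cases hcd : lexLe c d
            · rfl
            · rw [hblock d hd hcd hsd]
              rfl
          · have hcd : lexLe c d = true := lexLe_trans hcls hsd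
            rw [hcd]
        have hsub : List.Sublist ((candL k n).filter (fun d => lexLe s d))
            ((candL k n).filter (fun d => lexLe c d)) :=
          filter_sublist_of_imp _ _ _ (fun d _ hsd => lexLe_trans hcls hsd)
        have hlt2 : ((candL k n).filter (fun d => lexLe s d)).length
            < ((candL k n).filter (fun d => lexLe c d)).length := by
          rcases Nat.eq_or_lt_of_le hsub.length_le with heq | hlt'
          · exfalso
            have heqlist := hsub.eq_of_length heq
            have hcin : c ∈ (candL k n).filter (fun d => lexLe c d) :=
              List.mem_filter.mpr ⟨mem_candL.mpr ⟨hlen, hent⟩, lexLe_refl c⟩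
            rw [← heqlist] at hcin
            have hfc := (List.mem_filter.mp hcin).2
            rw [hslc] at hfc
            exact absurd hfc (by simp)
          · exact hlt'
        rw [ih s hslen hsent (by omega)]
        exact hswitch.symm

-- ---- assembling the two outer loops ----

lemma kloop_eq (graph : List (List Int)) (hn : 0 < graph.length) :
    ∀ ks : List Int, (∀ x ∈ ks, 1 ≤ x) →
      pv_colorLoop graph ks = pvB_kloop graph graph.length ks := by
  intro ks
  induction ks with
  | nil => intro _; rfl
  | cons k0 ks ih =>
    intro hks
    have hk1 : (1 : Int) ≤ k0 := hks k0 (by simp)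
    have hA := gc_find graph k0 graph.length [] (by simp)
    simp only [List.length_nil, List.nil_append] at hA
    have hmapid : ((candL k0 graph.length).map (fun s => s)) = candL k0 graph.length := by
      simp
    rw [hmapid] at hA
    have hfilter : (candL k0 graph.length).filter
        (fun d => lexLe (List.replicate graph.length 1) d) = candL k0 graph.length := by
      apply List.filter_eq_self.mpr
      intro d hd
      obtain ⟨hdl, hde⟩ := mem_candL.mp hd
      have h := lexLe_replicate_one (d := d) (fun x hx => (hde x hx).1)
      rw [hdl] at h
      exact h
    have hfuel : ((candL k0 graph.length).filter
        (fun d => lexLe (List.replicate graph.length 1) d)).length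
        < (k0.toNat + 1) ^ graph.length + 1 := by
      rw [hfilter, length_candL]
      have := Nat.pow_le_pow_left (show k0.toNat ≤ k0.toNat + 1 from by omega) graph.length
      omega
    have hB := loop_find graph k0 graph.length ((k0.toNat + 1) ^ graph.length + 1)
      (List.replicate graph.length 1) (by simp)
      (fun x hx => by rw [List.eq_of_mem_replicate hx]; exact ⟨le_refl 1, hk1⟩) hfuel
    rw [hfilter] at hB
    simp only [pv_colorLoop, pvB_kloop]
    rw [hA, hB]
    cases hF : (candL k0 graph.length).find? (pvGood graph graph.length 0) with
    | some rr =>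
      have hrne : rr ≠ [] := by
        have hm := List.mem_of_find?_eq_some hF
        have hl := (mem_candL.mp hm).1
        intro hcon
        rw [hcon] at hl
        simp at hl
        omega
      simp [hrne]
    | none => exact ih (fun x hx => hks x (by simp [hx]))

-- ===== VERDICT (by name: the statement is the Claim_ definition above) =====
theorem find_chromatic_number_bruteforce_spec : Claim_equal_find_chromatic_number_bruteforce := by
  intro graph _ _
  unfold Spec_find_chromatic_number_bruteforce
  unfold find_chromatic_number_bruteforce find_chromatic_number_bruteforce_alt
  rcases Nat.eq_zero_or_pos graph.length with h0 | hpos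
  · rw [PySem.List.pyRange_one_eq_nil (by omega)]
    simp [pv_colorLoop, pvB_kloop]
  · exact kloop_eq graph hpos _ (fun x hx => (PySem.List.mem_pyRange_one.mp hx).1)
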